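-- pv_equiv track=rewrite | github.com/rkaufman13/advent-of-code-2023 | day9/day9.py | find_offset_backwards
-- ===== SOURCE A (Python) =====
-- def find_offset_backwards(lists):
--     offsets = [i[0] for i in lists]
--     total_offset = 0
--     if len(offsets)==1:
--         return offsets[0]
--     if len(offsets) ==2:
--         return (offsets[1]-offsets[0])*-1
--     offsets=offsets[::-1]
--     total_offset = offsets[1]-offsets[0]
--     for i in range(2, len(offsets)):
--         total_offset= offsets[i] - total_offset
--     return total_offset
-- ===== SOURCE B (Python) =====
-- def find_offset_backwards(lists):
--     offsets = [l[0] for l in lists]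
--     total = offsets[0]
--     sign = -1
--     for x in offsets[1:]:
--         total += sign * x
--         sign = -sign
--     return total
-- ===== Notes on version B (the rewrite author's own statement) =====
-- stated objective: simpler
-- what changed: Replaced the reversal, two length special cases and right-nested subtraction loop by a single forward pass accumulating the alternating sum of the first elements with a flipping sign.
import Mathlib
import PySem

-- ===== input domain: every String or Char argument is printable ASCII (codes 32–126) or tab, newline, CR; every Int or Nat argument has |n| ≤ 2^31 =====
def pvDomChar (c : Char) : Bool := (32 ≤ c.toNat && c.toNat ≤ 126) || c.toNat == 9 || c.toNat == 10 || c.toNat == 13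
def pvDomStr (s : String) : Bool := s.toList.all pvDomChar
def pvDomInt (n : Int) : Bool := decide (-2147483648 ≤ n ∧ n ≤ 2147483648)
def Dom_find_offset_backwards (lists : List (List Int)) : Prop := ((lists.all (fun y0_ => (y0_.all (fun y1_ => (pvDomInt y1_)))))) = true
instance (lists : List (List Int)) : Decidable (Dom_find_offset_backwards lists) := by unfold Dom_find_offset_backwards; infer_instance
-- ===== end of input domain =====

-- B replaces A's reversal, two hand-written length special cases and right-nested
-- subtraction loop by one forward pass accumulating the alternating sum with a
-- flipping sign (objective: simpler).

-- ===== PORT A =====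
def find_offset_backwards (lists : List (List Int)) : Int :=
  let offsets := lists.map (fun i => PySem.List.pyGetD i 0 0)
  if PySem.List.len offsets = 1 then
    PySem.List.pyGetD offsets 0 0
  else if PySem.List.len offsets = 2 then
    (PySem.List.pyGetD offsets 1 0 - PySem.List.pyGetD offsets 0 0) * (-1)
  else
    let offsets2 := (PySem.List.slice? offsets none none (-1)).getD []
    let total := PySem.List.pyGetD offsets2 1 0 - PySem.List.pyGetD offsets2 0 0
    (PySem.List.pyRange 2 (PySem.List.len offsets2) 1).foldl
      (fun total i => PySem.List.pyGetD offsets2 i 0 - total) total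

-- ===== PORT B =====
def find_offset_backwards_alt (lists : List (List Int)) : Int :=
  let offsets := lists.map (fun l => PySem.List.pyGetD l 0 0)
  let init : Int × Int := (PySem.List.pyGetD offsets 0 0, -1)
  ((PySem.List.slice offsets (some 1) none).foldl
      (fun ts x => (ts.1 + ts.2 * x, -ts.2)) init).1

-- ===== PRECONDITION & SPEC =====
-- Python A raises IndexError when lists is empty (offsets[1]) or any sublist is
-- empty (i[0] in the comprehension); exactly those inputs are excluded.
def Pre_find_offset_backwards (lists : List (List Int)) : Prop :=
  lists ≠ [] ∧ ∀ l ∈ lists, l ≠ []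
instance (lists : List (List Int)) : Decidable (Pre_find_offset_backwards lists) := by
  unfold Pre_find_offset_backwards; infer_instance
def pvWitness_find_offset_backwards : List (List Int) := [[1], [2], [3]]

def Spec_find_offset_backwards (lists : List (List Int)) (out : Int) : Prop := out = find_offset_backwards_alt lists
instance (lists : List (List Int)) (out : Int) : Decidable (Spec_find_offset_backwards lists out) := by unfold Spec_find_offset_backwards; infer_instance

-- ===== CLAIM (what is proved, stated in full; the proofs are below) =====
def Claim_equal_find_offset_backwards : Prop := ∀ (lists : List (List Int)), Dom_find_offset_backwards lists → Pre_find_offset_backwards lists → Spec_find_offset_backwards lists (find_offset_backwards lists)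

-- ===== LEMMAS AND PROOFS =====

/-- Alternating sum x0 - (x1 - (x2 - …)). -/
def pvAlt : List Int → Int
  | [] => 0
  | x :: xs => x - pvAlt xs

lemma pv_b_fold (xs : List Int) : ∀ t s : Int,
    (xs.foldl (fun (ts : Int × Int) x => (ts.1 + ts.2 * x, -ts.2)) (t, s)).1
      = t + s * pvAlt xs := by
  induction xs with
  | nil => intro t s; simp [pvAlt]
  | cons x xs ih => intro t s; simp only [List.foldl_cons, pvAlt, ih]; ring

lemma pv_alt_append_pair (xs : List Int) (y z : Int) :
    pvAlt (xs ++ [y, z]) = pvAlt xs + (-1 : Int) ^ xs.length * (y - z) := by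
  induction xs with
  | nil => simp [pvAlt]
  | cons x xs ih => simp only [List.cons_append, pvAlt, ih, List.length_cons]; ring

lemma pv_foldA (ys : List Int) : ∀ t : Int,
    ys.foldl (fun t x => x - t) t = pvAlt ys.reverse + (-1 : Int) ^ ys.length * t := by
  induction ys using List.reverseRecOn with
  | nil => intro t; simp [pvAlt]
  | append_singleton ys x ih =>
      intro t
      simp only [List.foldl_append, List.foldl_cons, List.foldl_nil, ih,
        List.reverse_append, List.reverse_cons, List.reverse_nil, List.nil_append,
        List.cons_append, pvAlt, List.length_append, List.length_cons, List.length_nil]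
      ring

lemma pv_A_branch (r : List Int) (h : 2 ≤ r.length) :
    (r.drop 2).foldl (fun t x => x - t)
        (PySem.List.pyGetD r 1 0 - PySem.List.pyGetD r 0 0) = pvAlt r.reverse := by
  obtain ⟨p, q, tail, rfl⟩ : ∃ p q tail, r = p :: q :: tail := by
    match r, h with
    | p :: q :: tail, _ => exact ⟨p, q, tail, rfl⟩
  have h0 : PySem.List.pyGetD (p :: q :: tail) 0 0 = p := by
    simp [PySem.List.pyGetD_zero_cons]
  have h1 : PySem.List.pyGetD (p :: q :: tail) 1 0 = q := by
    have := PySem.List.pyGetD_ofNat (n := 1) (xs := p :: q :: tail) (d := 0) (by simp)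
    simpa using this
  rw [h0, h1]
  show tail.foldl (fun t x => x - t) (q - p) = pvAlt (p :: q :: tail).reverse
  rw [pv_foldA]
  have : (p :: q :: tail).reverse = tail.reverse ++ [q, p] := by simp
  rw [this, pv_alt_append_pair]
  simp

-- ===== VERDICT (by name: the statement is the Claim_ definition above) =====
theorem find_offset_backwards_spec : Claim_equal_find_offset_backwards := by
  intro lists _ _
  show find_offset_backwards lists = find_offset_backwards_alt lists
  unfold find_offset_backwards find_offset_backwards_alt
  simp only [PySem.List.slice?_none_none_neg_one, Option.getD_some,
    PySem.List.slice_from_one, PySem.List.len_eq]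
  generalize lists.map (fun i => PySem.List.pyGetD i 0 0) = offs
  match offs with
  | [] => decide
  | [a] => norm_num [PySem.List.pyGetD_zero_cons]
  | a :: b :: rest =>
      match rest with
      | [] =>
          have h1 : PySem.List.pyGetD [a, b] 1 0 = b := by
            have := PySem.List.pyGetD_ofNat (n := 1) (xs := [a, b]) (d := 0) (by simp)
            simpa using this
          norm_num [h1, PySem.List.pyGetD_zero_cons]
          ring
      | c :: rest' =>
          have hne1 : ¬ ((a :: b :: c :: rest').length : Int) = 1 := by
            simp only [List.length_cons]; push_cast; omega
          have hne2 : ¬ ((a :: b :: c :: rest').length : Int) = 2 := by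
            simp only [List.length_cons]; push_cast; omega
          rw [if_neg hne1, if_neg hne2, List.tail_cons, pv_b_fold]
          have hA :
              List.foldl
                (fun total i => PySem.List.pyGetD (a :: b :: c :: rest').reverse i 0 - total)
                (PySem.List.pyGetD (a :: b :: c :: rest').reverse 1 0 -
                  PySem.List.pyGetD (a :: b :: c :: rest').reverse 0 0)
                (PySem.List.pyRange 2 ((a :: b :: c :: rest').reverse.length : Int))
                = pvAlt (a :: b :: c :: rest') := by
            have hfold := PySem.List.foldl_pyRange_pyGetD' (a :: b :: c :: rest').reverse 0
              (fun t x => x - t)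
              (PySem.List.pyGetD (a :: b :: c :: rest').reverse 1 0 -
                PySem.List.pyGetD (a :: b :: c :: rest').reverse 0 0) (a := 2) (by norm_num)
            have hbr := pv_A_branch (a :: b :: c :: rest').reverse (by simp)
            rw [List.reverse_reverse] at hbr
            exact hfold.trans hbr
          rw [hA]
          simp only [PySem.List.pyGetD_zero_cons, pvAlt]
          ring
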